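-- pv_equiv track=rewrite | github.com/Yael-Finchelstein/Next-Py | Intermediate-assignments/unit1/ex1.3.4.py | shift_chars_backward
-- ===== SOURCE A (Python) =====
-- def shift_chars_backward(password):
--     shifted_password = ""
--     for char in password:
--         if char.islower():
--             shifted_char = chr(ord(char) - 2)
--             if shifted_char < 'a':
--                 shifted_char = chr(ord(shifted_char) + 26)
--             shifted_password += shifted_char
--         else:
--             shifted_password += char
--     return shifted_password
-- ===== SOURCE B (Python) =====
-- _TABLE = str.maketrans({chr(ord('a') + i): chr(ord('a') + (i - 2) % 26) for i in range(26)})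
--
-- def shift_chars_backward(password):
--     return password.translate(_TABLE)
-- ===== Notes on version B (the rewrite author's own statement) =====
-- stated objective: faster
-- what changed: B precomputes a 26-entry translation table once and applies it with a single str.translate call, replacing A's per-character branch/arithmetic loop with quadratic string concatenation.
import Mathlib
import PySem

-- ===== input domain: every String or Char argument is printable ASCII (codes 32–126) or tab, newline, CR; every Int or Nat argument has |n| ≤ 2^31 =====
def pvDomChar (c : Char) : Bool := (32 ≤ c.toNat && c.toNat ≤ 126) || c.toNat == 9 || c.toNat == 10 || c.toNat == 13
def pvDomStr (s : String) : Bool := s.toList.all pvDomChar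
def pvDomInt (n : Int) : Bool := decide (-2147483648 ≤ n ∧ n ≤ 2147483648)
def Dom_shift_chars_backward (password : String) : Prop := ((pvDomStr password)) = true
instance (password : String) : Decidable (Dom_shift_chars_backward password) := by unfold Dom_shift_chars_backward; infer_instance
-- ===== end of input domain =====

-- B replaces A's per-character branch-and-shift loop by a translation table built once
-- and applied in a single pass (idiomatic str.translate); return values agree on Dom.

-- ===== PORT A =====
-- literal port of A: loop over the characters, accumulating the shifted string
def shift_chars_backward (password : String) : String :=
  String.ofList (password.toList.foldl (fun acc c =>
    if PySem.Chars.islower c then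
      let s := Char.ofNat (c.toNat - 2)
      let s := if s < 'a' then Char.ofNat (s.toNat + 26) else s
      acc ++ [s]
    else acc ++ [c]) [])

-- ===== PORT B =====
-- the table built by str.maketrans({chr(ord('a')+i): chr(ord('a')+(i-2)%26) for i in range(26)})
def pvTable : PySem.Dict Char Char :=
  (PySem.List.pyRange 0 26 1).foldl
    (fun d i => d.insert (Char.ofNat (97 + i.toNat))
                         (Char.ofNat (97 + (PySem.Int.mod (i - 2) 26).toNat)))
    PySem.Dict.empty

-- password.translate(_TABLE): each character mapped through the table, absent keys unchanged
def shift_chars_backward_alt (password : String) : String :=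
  String.ofList (password.toList.map (fun c => (pvTable.get? c).getD c))

-- ===== PRECONDITION & SPEC =====
def Spec_shift_chars_backward (password : String) (out : String) : Prop := out = shift_chars_backward_alt password
instance (password : String) (out : String) : Decidable (Spec_shift_chars_backward password out) := by unfold Spec_shift_chars_backward; infer_instance

-- ===== CLAIM (what is proved, stated in full; the proofs are below) =====
def Claim_equal_shift_chars_backward : Prop := ∀ (password : String), Dom_shift_chars_backward password → Spec_shift_chars_backward password (shift_chars_backward password)

-- ===== LEMMAS AND PROOFS =====

-- A's per-character step, named for the proofs
def pvStepA (c : Char) : Char :=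
  if PySem.Chars.islower c then
    let s := Char.ofNat (c.toNat - 2)
    if s < 'a' then Char.ofNat (s.toNat + 26) else s
  else c

lemma stepA_eq_accum : ∀ (l acc : List Char),
    l.foldl (fun acc c =>
      if PySem.Chars.islower c then
        let s := Char.ofNat (c.toNat - 2)
        let s := if s < 'a' then Char.ofNat (s.toNat + 26) else s
        acc ++ [s]
      else acc ++ [c]) acc = acc ++ l.map pvStepA := by
  intro l
  induction l with
  | nil => intro acc; simp
  | cons x xs ih =>
    intro acc
    rw [List.foldl_cons, ih]
    by_cases h : PySem.Chars.islower x <;> simp [pvStepA, h]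

set_option maxRecDepth 4000 in
lemma perchar_fin : ∀ n : Fin 127,
    pvStepA (Char.ofNat n) = ((pvTable.get? (Char.ofNat n)).getD (Char.ofNat n)) := by
  decide

lemma perchar (c : Char) (h : pvDomChar c = true) :
    pvStepA c = (pvTable.get? c).getD c := by
  have hle : c.toNat < 127 := by
    simp [pvDomChar] at h
    omega
  have := perchar_fin ⟨c.toNat, hle⟩
  simpa [Char.ofNat_toNat] using this

-- ===== VERDICT (by name: the statement is the Claim_ definition above) =====
theorem shift_chars_backward_spec : Claim_equal_shift_chars_backward := by
  intro password hdom
  unfold Spec_shift_chars_backward shift_chars_backward shift_chars_backward_alt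
  rw [stepA_eq_accum password.toList []]
  rw [List.nil_append]
  congr 1
  apply List.map_congr_left
  intro c hc
  exact perchar c (by
    have := (List.all_eq_true.mp hdom) c hc
    simpa using this)
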